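-- pv_equiv track=rewrite | github.com/priagungs/midtrans-se-intern | problem_6.py | countRemoveChar
-- ===== SOURCE A (Python) =====
-- def countRemoveChar(str1, str2):
--     count = 0
--     for c1 in str1:
--         if(c1 not in str2):
--             count+=1
--     for c2 in str2:
--         if(c2 not in str1):
--             count+=1
--     return count
-- ===== SOURCE B (Python) =====
-- def countRemoveChar(str1, str2):
--     s1 = set(str1)
--     s2 = set(str2)
--     total = 0
--     for ch in s1 - s2:
--         total += str1.count(ch)
--     for ch in s2 - s1:
--         total += str2.count(ch)
--     return total
-- ===== Notes on version B (the rewrite author's own statement) =====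
-- stated objective: faster
-- what changed: Instead of scanning the whole other string for every single character, B builds the two character sets once, takes the set differences, and adds up str.count over each difference's few distinct characters.
import Mathlib
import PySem

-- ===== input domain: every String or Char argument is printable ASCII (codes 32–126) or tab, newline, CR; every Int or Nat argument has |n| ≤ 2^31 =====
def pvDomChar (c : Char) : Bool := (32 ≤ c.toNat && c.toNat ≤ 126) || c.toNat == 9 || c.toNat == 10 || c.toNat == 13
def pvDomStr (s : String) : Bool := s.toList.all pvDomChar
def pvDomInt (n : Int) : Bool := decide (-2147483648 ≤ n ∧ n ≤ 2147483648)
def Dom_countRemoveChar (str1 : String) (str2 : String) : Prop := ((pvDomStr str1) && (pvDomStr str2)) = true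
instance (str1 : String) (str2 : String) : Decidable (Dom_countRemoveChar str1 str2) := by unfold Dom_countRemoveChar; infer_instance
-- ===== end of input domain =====

-- B builds the two character sets once, takes the set differences, and adds up
-- str.count over each difference's distinct characters, instead of scanning the
-- whole other string for every single character (objective: faster).
-- B iterates over Python set differences only to SUM counts, so the result does
-- not depend on the set iteration order.

-- ===== PORT A =====
def countRemoveChar (str1 : String) (str2 : String) : Int :=
  let count : Int :=
    str1.toList.foldl (fun count c1 => if !(str2.toList.contains c1) then count + 1 else count) 0
  str2.toList.foldl (fun count c2 => if !(str1.toList.contains c2) then count + 1 else count) count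

-- ===== PORT B =====
def countRemoveChar_alt (str1 : String) (str2 : String) : Int :=
  let s1 : PySem.Set Char := PySem.Set.ofList str1.toList
  let s2 : PySem.Set Char := PySem.Set.ofList str2.toList
  let total : Int :=
    (PySem.Set.diff s1 s2).foldl
      (fun total ch => total + (PySem.Chars.count str1.toList [ch] : Int)) 0
  (PySem.Set.diff s2 s1).foldl
    (fun total ch => total + (PySem.Chars.count str2.toList [ch] : Int)) total

-- ===== PRECONDITION & SPEC =====
def Spec_countRemoveChar (str1 : String) (str2 : String) (out : Int) : Prop := out = countRemoveChar_alt str1 str2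
instance (str1 : String) (str2 : String) (out : Int) : Decidable (Spec_countRemoveChar str1 str2 out) := by unfold Spec_countRemoveChar; infer_instance

-- ===== CLAIM (what is proved, stated in full; the proofs are below) =====
def Claim_equal_countRemoveChar : Prop := ∀ (str1 : String) (str2 : String), Dom_countRemoveChar str1 str2 → Spec_countRemoveChar str1 str2 (countRemoveChar str1 str2)

-- ===== LEMMAS AND PROOFS =====

-- Summing l.count k over a duplicate-free key list ks that contains exactly the
-- elements of l satisfying p gives countP p l.
theorem pv_sum_count_eq_countP (p : Char → Bool) :
    ∀ (l ks : List Char), ks.Nodup → (∀ x ∈ l, p x = true → x ∈ ks) →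
      (∀ x ∈ ks, p x = true) →
      ((ks.map (fun k => (l.count k : Int))).sum = (l.countP p : Int)) := by
  intro l
  induction l with
  | nil => intro ks _ _ _; simp
  | cons c t ih =>
    intro ks hnd hcover hp
    have hstep : (fun k => ((c :: t).count k : Int))
        = fun k => (t.count k : Int) + (if c == k then 1 else 0) := by
      funext k
      simp [List.count_cons]
    rw [hstep, PySem.List.sum_map_add_int,
        ih ks hnd (fun x hx hpx => hcover x (List.mem_cons_of_mem _ hx) hpx) hp,
        PySem.List.sum_map_ite_one_zero]
    have hcnt : ks.countP (fun k => c == k) = if p c then 1 else 0 := by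
      have : ks.countP (fun k => c == k) = ks.count c := by
        rw [List.count]
        exact List.countP_congr (fun x _ => by simp only [beq_iff_eq]; exact eq_comm)
      rw [this]
      by_cases hpc : p c = true
      · have hc : c ∈ ks := hcover c (List.mem_cons_self) hpc
        simp [hpc, List.count_eq_one_of_mem hnd hc]
      · have hc : c ∉ ks := fun hmem => hpc (hp c hmem)
        simp [List.count_eq_zero_of_not_mem hc]
        simp_all
    rw [hcnt, List.countP_cons]
    by_cases hpc : p c = true <;> simp [hpc]
  
-- one pass of A equals countP
theorem pvA_pass (l1 l2 : List Char) (a : Int) :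
    l1.foldl (fun count c => if !(l2.contains c) then count + 1 else count) a
      = a + (l1.countP (fun c => !(l2.contains c)) : Int) := by
  exact PySem.List.foldl_if_add_one _ l1 a

-- one pass of B equals the same countP
-- str.count with a single-character needle is the character count
theorem pv_go_singleton (c : Char) : ∀ (fuel : Nat) (l : List Char) (acc : Nat), l.length ≤ fuel →
    PySem.Chars.count.go [c] fuel l acc = acc + l.count c := by
  intro fuel
  induction fuel with
  | zero =>
    intro l acc h
    have : l = [] := List.eq_nil_of_length_eq_zero (Nat.le_zero.mp h)
    subst this
    simp [PySem.Chars.count.go]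
  | succ n ih =>
    intro l acc h
    cases l with
    | nil => simp [PySem.Chars.count.go]
    | cons hd t =>
      have hn : t.length ≤ n := by simpa using Nat.le_of_succ_le_succ (by simpa using h)
      by_cases hc : c = hd
      · subst hc
        simp [PySem.Chars.count.go, List.isPrefixOf, ih _ _ hn]
        omega
      · simp [PySem.Chars.count.go, List.isPrefixOf, Ne.symm hc, ih _ _ hn, hc]

theorem pv_count_singleton (l : List Char) (c : Char) :
    PySem.Chars.count l [c] = l.count c := by
  have h0 : PySem.Chars.count l [c] = PySem.Chars.count.go [c] l.length l 0 := by
    simp [PySem.Chars.count]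
  rw [h0, pv_go_singleton c l.length l 0 le_rfl, Nat.zero_add]

theorem pv_diff_eq_filter (l1 l2 : List Char) :
    PySem.Set.diff (PySem.Set.ofList l1) (PySem.Set.ofList l2)
      = (PySem.Set.ofList l1).filter (fun k => !(l2.contains k)) := by
  unfold PySem.Set.diff
  apply List.filter_congr
  intro x _
  simp [PySem.Set.contains, PySem.Set.mem_ofList]

-- one pass of B equals the same countP as the matching pass of A
theorem pvB_pass (l1 l2 : List Char) (a : Int) :
    (PySem.Set.diff (PySem.Set.ofList l1) (PySem.Set.ofList l2)).foldl
        (fun total ch => total + (PySem.Chars.count l1 [ch] : Int)) a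
      = a + (l1.countP (fun c => !(l2.contains c)) : Int) := by
  rw [pv_diff_eq_filter]
  have hcg := PySem.List.foldl_congr_mem
      (l := (PySem.Set.ofList l1).filter (fun k => !(l2.contains k))) (init := a)
      (f := fun total ch => total + (PySem.Chars.count l1 [ch] : Int))
      (g := fun total ch => total + (l1.count ch : Int))
      (fun acc ch _ => by simp [pv_count_singleton])
  rw [hcg, PySem.List.foldl_add (g := fun k => (l1.count k : Int))]
  congr 1
  apply pv_sum_count_eq_countP
  · exact (PySem.Set.nodup_ofList l1).filter _
  · intro x hx hpx
    exact List.mem_filter.mpr ⟨(PySem.Set.mem_ofList l1 x).mpr hx, hpx⟩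
  · intro x hx
    exact (List.mem_filter.mp hx).2

-- ===== VERDICT (by name: the statement is the Claim_ definition above) =====
theorem countRemoveChar_spec : Claim_equal_countRemoveChar := by
  intro str1 str2 _
  unfold Spec_countRemoveChar countRemoveChar countRemoveChar_alt
  rw [pvA_pass, pvA_pass, pvB_pass, pvB_pass]
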